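-- pv_equiv track=rewrite | github.com/haej-netizen/programmers1 | 프로그래머스/1/136798. 기사단원의 무기/기사단원의 무기.py | solution
-- ===== SOURCE A (Python) =====
-- def solution(number, limit, power):
--     answer = 0
--     # 약수 개수를 저장할 배열 (1~n)
--     div = [0] * (number + 1)
--
--         # i가 약수인 모든 수 j = i, 2i, 3i, ... 에 +1씩
--     for i in range(1, number + 1):
--         for j in range(i, number + 1, i):
--             div[j] += 1
--
--     for d in div :
--         if d > limit :
--             answer += power
--         else :
--             answer += d
--     return answer
-- ===== SOURCE B (Python) =====
-- def solution(number, limit, power):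
--     counts = [0] * (number + 1)
--     d = 1
--     while d * d <= number:
--         # d pairs with itself at d*d (one divisor), and with every larger
--         # cofactor q = j // d > d at j = d*q (two divisors each)
--         counts[d * d] += 1
--         for j in range(d * (d + 1), number + 1, d):
--             counts[j] += 2
--         d += 1
--     answer = 0
--     for c in counts:
--         answer += power if c > limit else c
--     return answer
-- ===== Notes on version B (the rewrite author's own statement) =====
-- stated objective: faster
-- what changed: Replaces the full divisor sieve (every i from 1 to n marks all its multiples with +1) with a sqrt(n)-bounded divisor-pair sieve: each d <= sqrt(n) adds 1 at the square d*d and 2 at every multiple d*q with q > d, counting a divisor and its cofactor in one hit.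
import Mathlib
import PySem

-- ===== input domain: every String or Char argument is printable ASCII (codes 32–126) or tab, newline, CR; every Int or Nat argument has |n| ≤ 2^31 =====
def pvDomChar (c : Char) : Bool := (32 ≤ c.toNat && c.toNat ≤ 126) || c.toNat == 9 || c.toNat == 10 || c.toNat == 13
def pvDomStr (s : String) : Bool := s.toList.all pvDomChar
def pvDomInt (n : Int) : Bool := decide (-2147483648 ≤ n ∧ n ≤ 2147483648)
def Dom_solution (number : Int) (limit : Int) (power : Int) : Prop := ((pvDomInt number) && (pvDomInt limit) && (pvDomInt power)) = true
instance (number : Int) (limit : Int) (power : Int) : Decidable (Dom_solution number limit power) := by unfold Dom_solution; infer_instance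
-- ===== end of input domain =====

-- B replaces A's full divisor sieve (every i up to n marks its multiples +1) with a
-- √n-bounded divisor-pair sieve: each d ≤ √n adds 1 at the square d*d and 2 at every
-- d*q with q > d, counting both divisors of a pair at once. Objective: alternative.

-- ===== PORT A =====
def solution (number : Int) (limit : Int) (power : Int) : Int :=
  -- div = [0] * (number + 1)   (ported as an Array so it evaluates fast; same values)
  let div0 : Array Int := (PySem.List.pyRepeat [(0 : Int)] (number + 1)).toArray
  -- for i in range(1, number+1): for j in range(i, number+1, i): div[j] += 1
  -- (every index j here is ≥ 1 and < len(div), so j.toNat indexing is exact Python)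
  let div1 : Array Int :=
    (PySem.List.pyRange 1 (number + 1) 1).foldl
      (fun dv i =>
        (PySem.List.pyRange i (number + 1) i).foldl
          (fun dv2 j => dv2.set! j.toNat (dv2.getD j.toNat 0 + 1)) dv)
      div0
  -- for d in div: answer += power if d > limit else d
  div1.foldl (fun answer d => if d > limit then answer + power else answer + d) 0

-- ===== PORT B =====
-- the 'while d*d <= number' pair-sieve loop of Source B, literal
-- (every index d*d and j here is ≥ 1 and < len(counts), so .toNat indexing is exact Python)
def pvPairLoop (number : Int) (d : Int) (counts : Array Int) : Array Int :=
  if h : d * d ≤ number then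
    pvPairLoop number (d + 1)
      ((PySem.List.pyRange (d * (d + 1)) (number + 1) d).foldl
        (fun a j => a.set! j.toNat (a.getD j.toNat 0 + 2))
        (counts.set! (d * d).toNat (counts.getD (d * d).toNat 0 + 1)))
  else counts
termination_by (number + 1 - d).toNat
decreasing_by
  have hdi : d ≤ number := by
    rcases le_total d 0 with h0 | h0
    · exact le_trans (le_trans h0 (mul_self_nonneg d)) h
    · rcases Int.le_iff_lt_or_eq.mp h0 with h1 | h1
      · exact le_trans (le_mul_of_one_le_left (by omega) (by omega)) h
      · have h2 : (0 : Int) ≤ number := by simpa [← h1] using h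
        omega
  omega

def solution_alt (number : Int) (limit : Int) (power : Int) : Int :=
  let counts0 : Array Int := (PySem.List.pyRepeat [(0 : Int)] (number + 1)).toArray
  let counts1 := pvPairLoop number 1 counts0
  counts1.foldl (fun answer c => answer + (if c > limit then power else c)) 0

-- ===== PRECONDITION & SPEC =====
def Spec_solution (number : Int) (limit : Int) (power : Int) (out : Int) : Prop := out = solution_alt number limit power
instance (number : Int) (limit : Int) (power : Int) (out : Int) : Decidable (Spec_solution number limit power out) := by unfold Spec_solution; infer_instance

-- ===== CLAIM (what is proved, stated in full; the proofs are below) =====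
def Claim_equal_solution : Prop := ∀ (number : Int) (limit : Int) (power : Int), Dom_solution number limit power → Spec_solution number limit power (solution number limit power)

-- ===== LEMMAS AND PROOFS =====

-- divisor-count spec both programs are reduced to
def pvTau (m : Nat) : Int := ((Nat.divisors m).card : Int)

-- the window of divisors of m still to be discovered from candidate d upward:
-- small divisors e ≥ d below the square root, and large divisors whose cofactor is ≥ d
-- ---- the three facts about that window ----

theorem pv_S_step (m d : Nat) (hd : 1 ≤ d) (hle : d * d ≤ m) :
    ((Nat.divisors m).filter
      (fun e => (d ≤ e ∧ e * e ≤ m) ∨ (m ≤ e * e ∧ d * e ≤ m))).card =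
    ((Nat.divisors m).filter
      (fun e => (d + 1 ≤ e ∧ e * e ≤ m) ∨ (m ≤ e * e ∧ (d + 1) * e ≤ m))).card +
    (if d ∣ m then (if d * d = m then 1 else 2) else 0) := by
  have hm1 : 1 ≤ m := le_trans (Nat.one_le_iff_ne_zero.mpr (by positivity)) hle
  have hsplit : (Nat.divisors m).filter
        (fun e => (d ≤ e ∧ e * e ≤ m) ∨ (m ≤ e * e ∧ d * e ≤ m)) =
      ((Nat.divisors m).filter
        (fun e => (d + 1 ≤ e ∧ e * e ≤ m) ∨ (m ≤ e * e ∧ (d + 1) * e ≤ m))) ∪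
      ((Nat.divisors m).filter (fun e => e = d ∨ e * d = m)) := by
    rw [← Finset.filter_or]
    apply Finset.filter_congr
    intro e he
    obtain ⟨hedvd, hmne⟩ := Nat.mem_divisors.mp he
    obtain ⟨c, hc⟩ := hedvd
    have he1 : 1 ≤ e := Nat.pos_of_mem_divisors he
    constructor
    · intro hp
      by_cases hnext : (d + 1 ≤ e ∧ e * e ≤ m) ∨ (m ≤ e * e ∧ (d + 1) * e ≤ m)
      · exact Or.inl hnext
      · push_neg at hnext
        obtain ⟨hA, hB⟩ := hnext
        rcases hp with ⟨h1, h2⟩ | ⟨h1, h2⟩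
        · -- small divisor leaving the window: e = d
          have hed : e ≤ d := by
            by_contra hcon
            have := hA (by omega)
            omega
          exact Or.inr (Or.inl (by omega))
        · -- large divisor leaving the window: the cofactor is d, so e * d = m
          have h3 : m < (d + 1) * e := hB h1
          have hcd : c = d := by
            have hub : e * c < e * (d + 1) := by
              calc e * c = m := hc.symm
              _ < (d + 1) * e := h3
              _ = e * (d + 1) := by ring
            have hlb : e * d ≤ e * c := by
              calc e * d = d * e := by ring
              _ ≤ m := h2
              _ = e * c := hc
            have hu := Nat.lt_of_mul_lt_mul_left hub
            have hl := Nat.le_of_mul_le_mul_left hlb (by omega)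
            omega
          exact Or.inr (Or.inr (by rw [hc, hcd]))
    · intro hp
      rcases hp with (⟨h1, h2⟩ | ⟨h1, h2⟩) | (h | hem)
      · exact Or.inl ⟨by omega, h2⟩
      · exact Or.inr ⟨h1, by nlinarith⟩
      · exact Or.inl ⟨h.ge, by rw [h]; exact hle⟩
      · -- e * d = m : the cofactor divisor
        have hde : d ≤ e := by nlinarith
        have hcm : d * e = e * d := Nat.mul_comm d e
        exact Or.inr ⟨by nlinarith, by omega⟩
  have hdisj : Disjoint
      ((Nat.divisors m).filter
        (fun e => (d + 1 ≤ e ∧ e * e ≤ m) ∨ (m ≤ e * e ∧ (d + 1) * e ≤ m)))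
      ((Nat.divisors m).filter (fun e => e = d ∨ e * d = m)) := by
    rw [Finset.disjoint_left]
    intro e h1 h2
    obtain ⟨he1, hp1⟩ := Finset.mem_filter.mp h1
    obtain ⟨_, hp2⟩ := Finset.mem_filter.mp h2
    have hepos : 1 ≤ e := Nat.pos_of_mem_divisors he1
    rcases hp2 with rfl | hem
    · rcases hp1 with ⟨h3, _⟩ | ⟨h3, h4⟩
      · omega
      · nlinarith
    · rcases hp1 with ⟨h3, h4⟩ | ⟨h3, h4⟩
      · nlinarith
      · nlinarith
  have hE : ((Nat.divisors m).filter (fun e => e = d ∨ e * d = m)).card =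
      (if d ∣ m then (if d * d = m then 1 else 2) else 0) := by
    by_cases hdv : d ∣ m
    · obtain ⟨q, hq⟩ := id hdv
      have hdpos : 0 < d := by omega
      have hqpos : 0 < q := by nlinarith
      by_cases hsq' : d * d = m
      · have hset : (Nat.divisors m).filter (fun e => e = d ∨ e * d = m) = {d} := by
          apply Finset.ext
          intro e
          simp only [Finset.mem_filter, Finset.mem_singleton, Nat.mem_divisors]
          constructor
          · rintro ⟨_, h | h⟩
            · exact h
            · exact Nat.eq_of_mul_eq_mul_right hdpos (by omega)
          · intro h
            exact ⟨⟨⟨d, by rw [h]; exact hsq'.symm⟩, by omega⟩, Or.inl h⟩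
        rw [hset, if_pos hdv, if_pos hsq']
        exact Finset.card_singleton d
      · have hqd : q ≠ d := by
          intro h
          exact hsq' (by rw [hq, h])
        have hset : (Nat.divisors m).filter (fun e => e = d ∨ e * d = m) = {d, q} := by
          apply Finset.ext
          intro e
          simp only [Finset.mem_filter, Finset.mem_insert, Finset.mem_singleton,
            Nat.mem_divisors]
          constructor
          · rintro ⟨_, h | h⟩
            · exact Or.inl h
            · refine Or.inr (Nat.eq_of_mul_eq_mul_right hdpos ?_)
              have hcq : q * d = d * q := Nat.mul_comm q d
              omega
          · rintro (h | h)
            · exact ⟨⟨⟨q, by rw [h]; exact hq⟩, by omega⟩, Or.inl h⟩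
            · refine ⟨⟨⟨d, by rw [h, Nat.mul_comm q d]; exact hq⟩, by omega⟩, Or.inr ?_⟩
              rw [h, Nat.mul_comm q d]
              exact hq.symm
        rw [hset, if_pos hdv, if_neg hsq']
        rw [Finset.card_insert_of_notMem (by simpa using fun h => hqd h.symm)]
        rfl
    · have hset : (Nat.divisors m).filter (fun e => e = d ∨ e * d = m) = ∅ := by
        apply Finset.eq_empty_of_forall_notMem
        intro e he
        obtain ⟨hmem, hp⟩ := Finset.mem_filter.mp he
        obtain ⟨hedvd, _⟩ := Nat.mem_divisors.mp hmem
        rcases hp with h | hem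
        · exact hdv (h ▸ hedvd)
        · exact hdv ⟨e, by rw [← hem]; exact Nat.mul_comm e d⟩
      rw [hset, if_neg hdv]
      rfl
  rw [hsplit, Finset.card_union_of_disjoint hdisj, hE]

theorem pv_S_empty (m d : Nat) (hgt : m < d * d) :
    (Nat.divisors m).filter
      (fun e => (d ≤ e ∧ e * e ≤ m) ∨ (m ≤ e * e ∧ d * e ≤ m)) = ∅ := by
  apply Finset.eq_empty_of_forall_notMem
  intro e he
  obtain ⟨hmem, hp⟩ := Finset.mem_filter.mp he
  have hepos : 1 ≤ e := Nat.pos_of_mem_divisors hmem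
  rcases hp with ⟨h1, h2⟩ | ⟨h1, h2⟩
  · nlinarith
  · nlinarith

theorem pv_S_one (m : Nat) :
    (Nat.divisors m).filter
      (fun e => (1 ≤ e ∧ e * e ≤ m) ∨ (m ≤ e * e ∧ 1 * e ≤ m)) = Nat.divisors m := by
  apply Finset.filter_true_of_mem
  intro e he
  obtain ⟨hedvd, hmne⟩ := Nat.mem_divisors.mp he
  have he1 : 1 ≤ e := Nat.pos_of_mem_divisors he
  have hem : e ≤ m := Nat.le_of_dvd (by omega) hedvd
  rcases Nat.le_total (e * e) m with hh | hh
  · exact Or.inl ⟨he1, hh⟩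
  · exact Or.inr ⟨hh, by omega⟩

-- Array.getD at an in-range index
theorem pv_arr_getD (a : Array Int) (k : Nat) (h : k < a.size) : a.getD k 0 = a[k] := by
  rw [Array.getD_eq_getD_getElem?, Array.getElem?_eq_getElem h]
  rfl

-- one pass of 'for j in js: arr[j] += v' (js nonnegative): +v at each occurrence
theorem pv_incr_fold (v : Int) (js : List Int) (a : Array Int) (hjs : ∀ j ∈ js, 0 ≤ j) :
    (js.foldl (fun dv2 j => dv2.set! j.toNat (dv2.getD j.toNat 0 + v)) a).size = a.size ∧
    ∀ k : Nat, k < a.size →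
      (js.foldl (fun dv2 j => dv2.set! j.toNat (dv2.getD j.toNat 0 + v)) a).getD k 0 =
        a.getD k 0 + (js.countP (fun j => j = (k : Int)) : Int) * v := by
  induction js generalizing a with
  | nil => simp
  | cons j js ih =>
    have hj : 0 ≤ j := hjs j (by simp)
    have hrest : ∀ x ∈ js, 0 ≤ x := fun x hx => hjs x (by simp [hx])
    simp only [List.foldl_cons]
    obtain ⟨ihlen, ihget⟩ := ih (a.set! j.toNat (a.getD j.toNat 0 + v)) hrest
    have hsz : (a.set! j.toNat (a.getD j.toNat 0 + v)).size = a.size := by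
      simp [Array.set!]
    refine ⟨by rw [ihlen, hsz], ?_⟩
    intro k hk
    rw [ihget k (by omega), List.countP_cons]
    by_cases hjk : j = (k : Int)
    · have ht : j.toNat = k := by omega
      have h1 : (a.set! j.toNat (a.getD j.toNat 0 + v)).getD k 0 = a.getD k 0 + v := by
        rw [pv_arr_getD _ k (by omega)]
        simp only [Array.set!, ht]
        rw [Array.getElem_setIfInBounds_self (by simpa [Array.size_setIfInBounds] using hk)]
      rw [h1]
      simp only [hjk, decide_true, if_true]
      push_cast
      ring
    · have ht : j.toNat ≠ k := by omega
      have h1 : (a.set! j.toNat (a.getD j.toNat 0 + v)).getD k 0 = a.getD k 0 := by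
        rw [pv_arr_getD _ k (by omega)]
        simp only [Array.set!]
        rw [Array.getElem_setIfInBounds_ne hk ht]
        rw [pv_arr_getD _ k hk]
      rw [h1]
      simp only [hjk, decide_false]
      push_cast
      ring

-- the whole sieve double loop, pointwise
theorem pv_outer_fold (number : Int) (is : List Int) (a : Array Int) (his : ∀ i ∈ is, 1 ≤ i) :
    (is.foldl (fun dv i => (PySem.List.pyRange i (number + 1) i).foldl
        (fun dv2 j => dv2.set! j.toNat (dv2.getD j.toNat 0 + 1)) dv) a).size = a.size ∧
    ∀ k : Nat, k < a.size →
      (is.foldl (fun dv i => (PySem.List.pyRange i (number + 1) i).foldl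
          (fun dv2 j => dv2.set! j.toNat (dv2.getD j.toNat 0 + 1)) dv) a).getD k 0 =
        a.getD k 0 +
          (is.map (fun i => ((PySem.List.pyRange i (number + 1) i).countP (fun j => j = (k : Int)) : Int))).sum := by
  induction is generalizing a with
  | nil => simp
  | cons i is ih =>
    have hi1 : 1 ≤ i := his i (by simp)
    have hrest : ∀ x ∈ is, 1 ≤ x := fun x hx => his x (by simp [hx])
    have hjs : ∀ j ∈ PySem.List.pyRange i (number + 1) i, 0 ≤ j := by
      intro j hj
      have := (PySem.List.mem_pyRange_iff_of_pos (by omega) j).mp hj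
      omega
    obtain ⟨slen, sget⟩ := pv_incr_fold 1 (PySem.List.pyRange i (number + 1) i) a hjs
    simp only [List.foldl_cons]
    obtain ⟨ihlen, ihget⟩ := ih
      ((PySem.List.pyRange i (number + 1) i).foldl
        (fun dv2 j => dv2.set! j.toNat (dv2.getD j.toNat 0 + 1)) a) hrest
    refine ⟨by rw [ihlen, slen], ?_⟩
    intro k hk
    rw [ihget k (by rw [slen]; omega), sget k hk, List.map_cons, List.sum_cons]
    ring

-- countP of a single value in a duplicate-free list
theorem pv_countP_single (l : List Int) (hl : l.Nodup) (c : Int) :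
    l.countP (fun j => j = c) = if c ∈ l then 1 else 0 := by
  induction l with
  | nil => simp
  | cons a l ih =>
    obtain ⟨ha, hl'⟩ := List.nodup_cons.mp hl
    rw [List.countP_cons]
    by_cases hac : a = c
    · subst hac
      simp [ih hl', ha]
    · have hca : ¬ c = a := fun h => hac h.symm
      simp [ih hl', hac, hca]

-- count of one value in the arithmetic progression s, s+i, ... < b (i divides s)
theorem pv_count_in_range (b i s : Int) (hi : 1 ≤ i) (hs : i ∣ s) (c : Int) (hc : c < b) :
    ((PySem.List.pyRange s b i).countP (fun j => j = c) : Int) =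
      if i ∣ c ∧ s ≤ c then (1 : Int) else 0 := by
  have hnd : (PySem.List.pyRange s b i).Nodup := by
    rw [PySem.List.pyRange_of_pos _ _ (by omega)]
    refine List.Nodup.map ?_ List.nodup_range
    intro x y hxy
    have hxy' : i * (x : Int) = i * (y : Int) := by simpa using hxy
    have := mul_left_cancel₀ (show i ≠ 0 by omega) hxy'
    exact_mod_cast this
  rw [pv_countP_single _ hnd c]
  by_cases hmem : c ∈ PySem.List.pyRange s b i
  · obtain ⟨h1, h2, h3⟩ := (PySem.List.mem_pyRange_iff_of_pos (by omega) c).mp hmem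
    have hdvd : i ∣ c := by
      have h4 := dvd_add h3 hs
      simpa using h4
    rw [if_pos hmem, if_pos ⟨hdvd, h1⟩]
    rfl
  · rw [if_neg hmem, if_neg ?_]
    · rfl
    · rintro ⟨hdvd, hle⟩
      exact hmem ((PySem.List.mem_pyRange_iff_of_pos (by omega) c).mpr
        ⟨hle, hc, dvd_sub hdvd hs⟩)

-- List.countP over a range as a Finset card
theorem pv_countP_range (n : Nat) (p : Nat → Prop) [DecidablePred p] :
    (List.range n).countP (fun t => decide (p t)) = ((Finset.range n).filter p).card := by
  induction n with
  | zero => simp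
  | succ n ih =>
    rw [List.range_succ, List.countP_append, Finset.range_add_one, Finset.filter_insert]
    by_cases hp : p n
    · rw [if_pos hp, Finset.card_insert_of_notMem (by simp)]
      simp [hp, ih]
    · rw [if_neg hp]
      simp [hp, ih]

-- the divisors of k among 1..n are all of them once k ≤ n
theorem pv_tau_card (n k : Nat) (hk : k ≤ n) :
    ((Finset.range n).filter (fun t => (1 + t) ∣ k ∧ 1 + t ≤ k)).card = (Nat.divisors k).card := by
  rcases Nat.eq_zero_or_pos k with rfl | hk1
  · rw [Nat.divisors_zero, Finset.card_empty,
      Finset.filter_false_of_mem (fun t _ => by rintro ⟨_, h⟩; omega), Finset.card_empty]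
  · refine Finset.card_bij' (fun t _ => t + 1) (fun e _ => e - 1) ?hi ?hj ?hleft ?hright
    case hi =>
      intro t ht
      beta_reduce
      obtain ⟨_, hdvd, hle⟩ := Finset.mem_filter.mp ht
      rw [Nat.mem_divisors]
      exact ⟨by rw [Nat.add_comm]; exact hdvd, by omega⟩
    case hj =>
      intro e he
      beta_reduce
      obtain ⟨hedvd, hk0⟩ := Nat.mem_divisors.mp he
      have he1 : 1 ≤ e := Nat.pos_of_mem_divisors he
      have hek : e ≤ k := Nat.le_of_dvd hk1 hedvd
      rw [Finset.mem_filter, Finset.mem_range]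
      refine ⟨by omega, ?_, by omega⟩
      rw [show 1 + (e - 1) = e by omega]
      exact hedvd
    case hleft =>
      intro t ht
      beta_reduce
      omega
    case hright =>
      intro e he
      have := Nat.pos_of_mem_divisors he
      beta_reduce
      omega

-- one column of the sieve sums to the divisor count
theorem pv_sieve_count (number : Int) (k : Nat) (hk : (k : Int) < number + 1) :
    ((PySem.List.pyRange 1 (number + 1) 1).map
      (fun i => ((PySem.List.pyRange i (number + 1) i).countP (fun j => j = (k : Int)) : Int))).sum
      = pvTau k := by
  have h1 : ∀ i ∈ PySem.List.pyRange 1 (number + 1) 1,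
      ((PySem.List.pyRange i (number + 1) i).countP (fun j => j = (k : Int)) : Int) =
      if (fun i => decide (i ∣ (k : Int) ∧ i ≤ (k : Int))) i = true then (1 : Int) else 0 := by
    intro i hi
    have hi1 : 1 ≤ i := (PySem.List.mem_pyRange_one.mp hi).1
    rw [pv_count_in_range (number + 1) i i hi1 (dvd_refl i) (k : Int) hk]
    simp
  rw [List.map_congr_left h1, PySem.List.sum_map_ite_one_zero, PySem.List.pyRange_one 1 (number + 1),
    List.countP_map]
  have h2 : ((fun i => decide (i ∣ (k : Int) ∧ i ≤ (k : Int))) ∘ (fun t : Nat => (1 : Int) + (t : Int))) =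
      fun t : Nat => decide ((1 + t) ∣ k ∧ 1 + t ≤ k) := by
    funext t
    simp only [Function.comp]
    rw [decide_eq_decide]
    constructor
    · rintro ⟨hd, hle⟩
      refine ⟨?_, by omega⟩
      rw [← Int.natCast_dvd_natCast]
      push_cast
      exact hd
    · rintro ⟨hd, hle⟩
      refine ⟨?_, by omega⟩
      have : ((1 + t : Nat) : Int) ∣ ((k : Nat) : Int) := Int.natCast_dvd_natCast.mpr hd
      push_cast at this
      exact this
  rw [h2, pv_countP_range, pv_tau_card ((number + 1 - 1).toNat) k (by omega)]
  rfl

theorem solution_eq_tau_fold (number limit power : Int) (hn : 0 ≤ number) :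
    solution number limit power =
      (List.range (number + 1).toNat).foldl
        (fun answer k => if pvTau k > limit then answer + power else answer + pvTau k) 0 := by
  simp only [solution]
  rw [PySem.List.pyRepeat_singleton]
  obtain ⟨hlen, hget⟩ := pv_outer_fold number (PySem.List.pyRange 1 (number + 1) 1)
    (List.replicate (number + 1).toNat (0 : Int)).toArray
    (fun i hi => (PySem.List.mem_pyRange_one.mp hi).1)
  have hsz : (List.replicate (number + 1).toNat (0 : Int)).toArray.size = (number + 1).toNat := by
    simp
  have hlist : ((PySem.List.pyRange 1 (number + 1) 1).foldl
      (fun dv i => (PySem.List.pyRange i (number + 1) i).foldl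
        (fun dv2 j => dv2.set! j.toNat (dv2.getD j.toNat 0 + 1)) dv)
      (List.replicate (number + 1).toNat (0 : Int)).toArray).toList =
      (List.range (number + 1).toNat).map (fun k => pvTau k) := by
    apply List.ext_getElem
      (by rw [Array.length_toList, hlen, hsz, List.length_map, List.length_range])
    intro k h1 h2
    have hk : k < (number + 1).toNat := by
      rw [Array.length_toList, hlen, hsz] at h1
      omega
    rw [Array.getElem_toList, ← pv_arr_getD _ k (by rw [hlen, hsz]; omega), hget k (by omega)]
    have h0 : (List.replicate (number + 1).toNat (0 : Int)).toArray.getD k 0 = 0 := by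
      rw [pv_arr_getD _ k (by omega), List.getElem_toArray]
      simp
    rw [h0, pv_sieve_count number k (by omega)]
    simp
  rw [← Array.foldl_toList, hlist, List.foldl_map]

-- ---- B side: the pair sieve fills the same table ----

theorem pvPairLoop_spec (number : Int) (d : Nat) (hd : 1 ≤ d) (a : Array Int) :
    (pvPairLoop number (d : Int) a).size = a.size ∧
    ∀ k : Nat, k < a.size → (k : Int) ≤ number →
      (pvPairLoop number (d : Int) a).getD k 0 =
        a.getD k 0 + (((Nat.divisors k).filter
          (fun e => (d ≤ e ∧ e * e ≤ k) ∨ (k ≤ e * e ∧ d * e ≤ k))).card : Int) := by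
  by_cases hle : (d : Int) * (d : Int) ≤ number
  · rw [pvPairLoop, dif_pos hle]
    have hd0 : (0 : Int) < (d : Int) := by exact_mod_cast hd
    have hjs : ∀ j ∈ PySem.List.pyRange ((d : Int) * ((d : Int) + 1)) (number + 1) (d : Int), 0 ≤ j := by
      intro j hj
      obtain ⟨hj1, -, -⟩ := (PySem.List.mem_pyRange_iff_of_pos hd0 j).mp hj
      have hpos := mul_pos hd0 (show (0 : Int) < (d : Int) + 1 by omega)
      omega
    obtain ⟨ilen, iget⟩ := pv_incr_fold 2
      (PySem.List.pyRange ((d : Int) * ((d : Int) + 1)) (number + 1) (d : Int))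
      (a.set! ((d : Int) * (d : Int)).toNat (a.getD ((d : Int) * (d : Int)).toNat 0 + 1)) hjs
    have hsz1 : (a.set! ((d : Int) * (d : Int)).toNat
        (a.getD ((d : Int) * (d : Int)).toNat 0 + 1)).size = a.size := by
      simp [Array.set!]
    obtain ⟨rlen, rget⟩ := pvPairLoop_spec number (d + 1) (by omega)
      ((PySem.List.pyRange ((d : Int) * ((d : Int) + 1)) (number + 1) (d : Int)).foldl
        (fun a j => a.set! j.toNat (a.getD j.toNat 0 + 2))
        (a.set! ((d : Int) * (d : Int)).toNat (a.getD ((d : Int) * (d : Int)).toNat 0 + 1)))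
    push_cast at rlen rget
    refine ⟨by rw [rlen, ilen, hsz1], ?_⟩
    intro k hk hkn
    rw [rget k (by omega) hkn, iget k (by omega)]
    -- the single +1 at index d*d
    have h1 : (a.set! ((d : Int) * (d : Int)).toNat
        (a.getD ((d : Int) * (d : Int)).toNat 0 + 1)).getD k 0 =
        a.getD k 0 + (if d * d = k then (1 : Int) else 0) := by
      by_cases hsq : d * d = k
      · have ht : ((d : Int) * (d : Int)).toNat = k := by
          subst hsq; push_cast; omega
        rw [pv_arr_getD _ k (by omega)]
        simp only [Array.set!, ht]
        rw [Array.getElem_setIfInBounds_self (by simpa [Array.size_setIfInBounds] using hk)]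
        rw [if_pos hsq, pv_arr_getD _ k hk]
      · have ht : ((d : Int) * (d : Int)).toNat ≠ k := by
          intro h
          apply hsq
          have : ((d : Int) * (d : Int)) = (k : Int) := by
            have hnn : (0 : Int) ≤ (d : Int) * (d : Int) := by positivity
            omega
          exact_mod_cast this
        rw [pv_arr_getD _ k (by omega)]
        simp only [Array.set!]
        rw [Array.getElem_setIfInBounds_ne hk ht, if_neg hsq, pv_arr_getD _ k hk]
        ring
    rw [h1]
    -- the +2 sweep hits k exactly when d divides k with cofactor > d
    have h2 : ((PySem.List.pyRange ((d : Int) * ((d : Int) + 1)) (number + 1) (d : Int)).countP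
        (fun j => j = (k : Int)) : Int) =
        if (d : Int) ∣ (k : Int) ∧ (d : Int) * ((d : Int) + 1) ≤ (k : Int) then (1 : Int) else 0 :=
      pv_count_in_range (number + 1) (d : Int) ((d : Int) * ((d : Int) + 1)) (by omega)
        (Dvd.intro _ rfl) (k : Int) (by omega)
    rw [h2]
    -- fold the two contributions into one window step
    have hcast : d * d ≤ (number.toNat) := by omega
    by_cases hdk : d * d ≤ k
    · rw [pv_S_step k d hd hdk]
      by_cases hdvd : d ∣ k
      · have hdvd' : (d : Int) ∣ (k : Int) := Int.natCast_dvd_natCast.mpr hdvd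
        by_cases hsq : d * d = k
        · have hnot : ¬ (d : Int) * ((d : Int) + 1) ≤ (k : Int) := by
            push_neg
            have hkd : ((d * d : Nat) : Int) = (k : Int) := by exact_mod_cast hsq
            push_cast at hkd
            have hdd : (d : Int) * ((d : Int) + 1) = (d : Int) * (d : Int) + (d : Int) := by ring
            omega
          rw [if_pos hsq, if_neg (fun hcon => hnot hcon.2), if_pos hdvd, if_pos hsq]
          push_cast
          ring
        · obtain ⟨q, hq⟩ := id hdvd
          have hdq : d ≤ q := Nat.le_of_mul_le_mul_left (show d * d ≤ d * q by omega) (show 0 < d by omega)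
          have hqd : d + 1 ≤ q := by
            rcases Nat.eq_or_lt_of_le hdq with heq | hlt
            · exact absurd (by rw [hq, ← heq]) hsq
            · omega
          have hyes : (d : Int) * ((d : Int) + 1) ≤ (k : Int) := by
            have hqq : ((k : Nat) : Int) = ((d * q : Nat) : Int) := by exact_mod_cast hq
            push_cast at hqq
            have hq' : ((d : Int) + 1) ≤ (q : Int) := by exact_mod_cast hqd
            have hmul := mul_le_mul_of_nonneg_left hq' (le_of_lt hd0)
            omega
          rw [if_neg hsq, if_pos ⟨hdvd', hyes⟩, if_pos hdvd, if_neg hsq]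
          push_cast
          ring
      · have hdvd' : ¬ (d : Int) ∣ (k : Int) := fun h => hdvd (Int.natCast_dvd_natCast.mp h)
        have hsq : ¬ d * d = k := fun h => hdvd ⟨d, h.symm⟩
        rw [if_neg hsq, if_neg (fun hcon => hdvd' hcon.1), if_neg hdvd]
        push_cast
        ring
    · -- k below the square: nothing happens at step d, and both windows are empty
      push_neg at hdk
      rw [pv_S_empty k d hdk, pv_S_empty k (d + 1) (by nlinarith)]
      have hsq : ¬ d * d = k := by omega
      have hnot : ¬ ((d : Int) ∣ (k : Int) ∧ (d : Int) * ((d : Int) + 1) ≤ (k : Int)) := by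
        rintro ⟨-, hcon⟩
        have hdd : (d : Int) * ((d : Int) + 1) = (d : Int) * (d : Int) + (d : Int) := by ring
        have h5 : ((d * d : Nat) : Int) ≤ (k : Int) := by push_cast; omega
        have h6 : d * d ≤ k := by exact_mod_cast h5
        omega
      rw [if_neg hsq, if_neg hnot]
      ring
  · rw [pvPairLoop, dif_neg hle]
    refine ⟨rfl, ?_⟩
    intro k hk hkn
    have hgt : k < d * d := by
      have : (k : Int) < (d : Int) * (d : Int) := by omega
      exact_mod_cast this
    rw [pv_S_empty k d hgt]
    simp
termination_by (number + 1 - (d : Int)).toNat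
decreasing_by
  have hd1 : (1 : Int) ≤ (d : Int) := by exact_mod_cast hd
  have hdi : (d : Int) ≤ number := le_trans (le_mul_of_one_le_left (by omega) hd1) hle
  omega

theorem solution_alt_eq_tau_fold (number limit power : Int) (hn : 0 ≤ number) :
    solution_alt number limit power =
      (List.range (number + 1).toNat).foldl
        (fun answer k => if pvTau k > limit then answer + power else answer + pvTau k) 0 := by
  simp only [solution_alt]
  rw [PySem.List.pyRepeat_singleton]
  obtain ⟨hlen, hget⟩ := pvPairLoop_spec number 1 (le_refl 1)
    (List.replicate (number + 1).toNat (0 : Int)).toArray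
  simp only [Nat.cast_one] at hlen hget
  have hsz : (List.replicate (number + 1).toNat (0 : Int)).toArray.size = (number + 1).toNat := by
    simp
  have hlist : (pvPairLoop number 1 (List.replicate (number + 1).toNat (0 : Int)).toArray).toList =
      (List.range (number + 1).toNat).map (fun k => pvTau k) := by
    apply List.ext_getElem
      (by rw [Array.length_toList, hlen, hsz, List.length_map, List.length_range])
    intro k h1 h2
    have hk : k < (number + 1).toNat := by
      rw [Array.length_toList, hlen, hsz] at h1
      omega
    rw [Array.getElem_toList, ← pv_arr_getD _ k (by rw [hlen, hsz]; omega),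
      hget k (by omega) (by omega)]
    have h0 : (List.replicate (number + 1).toNat (0 : Int)).toArray.getD k 0 = 0 := by
      rw [pv_arr_getD _ k (by omega), List.getElem_toArray]
      simp
    rw [h0, pv_S_one k]
    simp [pvTau]
  rw [← Array.foldl_toList, hlist, List.foldl_map]
  apply PySem.List.foldl_congr_mem
  intro acc x hx
  by_cases h : pvTau x > limit
  · simp [h]
  · simp [h]

-- ===== VERDICT (by name: the statement is the Claim_ definition above) =====
theorem solution_spec : Claim_equal_solution := by
  intro number limit power _
  unfold Spec_solution
  by_cases hn : 0 ≤ number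
  · rw [solution_eq_tau_fold number limit power hn, solution_alt_eq_tau_fold number limit power hn]
  · -- number < 0: both programs loop over empty ranges and return 0
    simp only [solution, solution_alt]
    rw [PySem.List.pyRepeat_singleton, PySem.List.pyRange_one_eq_nil (by omega),
      pvPairLoop, dif_neg (by omega : ¬ (1 : Int) * 1 ≤ number)]
    have h0 : (number + 1).toNat = 0 := by omega
    simp [h0]
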